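-- pv_equiv track=rewrite | github.com/MrAgrawal1301/Github_Project_aiml | task3_forpr_riskscore.py | get_risk_score
-- ===== SOURCE A (Python) =====
-- def get_risk_score(created_day):
--     risk_score = {
--         "Low Risk": 3,
--         "Medium Risk": 5,
--         "High Risk": 8,
--         "Critical Risk": 10,
--     }
--     level_of_risk = None
--     for a,b in risk_score.items():
--         if created_day < b:
--             level_of_risk = f'{a} --> The PR is created {created_day} days ago.'
--             break
--         else:
--             level_of_risk = f'Critical Risk --> The PR is created {created_day} days ago.'
--     return level_of_risk
-- ===== SOURCE B (Python) =====
-- import bisect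
--
-- _THRESHOLDS = [3, 5, 8, 10]
-- _LABELS = ["Low Risk", "Medium Risk", "High Risk", "Critical Risk", "Critical Risk"]
--
-- def get_risk_score(created_day):
--     i = bisect.bisect_right(_THRESHOLDS, created_day)
--     return f'{_LABELS[i]} --> The PR is created {created_day} days ago.'
-- ===== Notes on version B (the rewrite author's own statement) =====
-- stated objective: idiomatic
-- what changed: Replaces the scan-with-break over the dict by bisect.bisect_right into parallel threshold/label tables (trailing 'Critical Risk' duplicated for the >=10 bucket) followed by a single indexed format.
import Mathlib
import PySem

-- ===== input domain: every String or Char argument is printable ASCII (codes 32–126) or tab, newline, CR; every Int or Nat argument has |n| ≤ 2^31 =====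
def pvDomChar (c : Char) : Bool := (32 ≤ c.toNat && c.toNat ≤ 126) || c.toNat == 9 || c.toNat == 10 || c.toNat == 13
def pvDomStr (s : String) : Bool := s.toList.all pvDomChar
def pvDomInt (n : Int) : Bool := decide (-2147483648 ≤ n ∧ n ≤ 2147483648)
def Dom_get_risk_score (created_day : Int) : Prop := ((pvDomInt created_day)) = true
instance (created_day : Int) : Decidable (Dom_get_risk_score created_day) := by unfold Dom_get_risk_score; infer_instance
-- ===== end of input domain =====

-- B replaces A's scan-with-break over the dict by bisect_right into parallel threshold/label tables (idiomatic; same cost).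

-- ===== PORT A =====
-- the for-loop over risk_score.items() with break; returns the last value assigned to level_of_risk
def pvLoopA (created_day : Int) : List (String × Int) → Option String → Option String
  | [], acc => acc
  | (a, b) :: rest, _ =>
    if created_day < b then
      some (a ++ " --> The PR is created " ++ PySem.Int.toStr created_day ++ " days ago.")
    else
      pvLoopA created_day rest
        (some ("Critical Risk --> The PR is created " ++ PySem.Int.toStr created_day ++ " days ago."))

def get_risk_score (created_day : Int) : String :=
  let risk_score : List (String × Int) :=
    [("Low Risk", 3), ("Medium Risk", 5), ("High Risk", 8), ("Critical Risk", 10)]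
  -- Python's level_of_risk starts as None; the dict is nonempty so the loop always assigns a string
  (pvLoopA created_day risk_score none).getD ""

-- ===== PORT B =====
def pvThresholds : List Int := [3, 5, 8, 10]
def pvLabels : List String :=
  ["Low Risk", "Medium Risk", "High Risk", "Critical Risk", "Critical Risk"]

-- bisect.bisect_right on a sorted list = number of elements ≤ x
def pvBisectRight (xs : List Int) (x : Int) : Nat :=
  (xs.filter (fun t => decide (t ≤ x))).length

def get_risk_score_alt (created_day : Int) : String :=
  let i := pvBisectRight pvThresholds created_day
  (pvLabels.getD i "") ++ " --> The PR is created " ++ PySem.Int.toStr created_day ++ " days ago."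

-- ===== PRECONDITION & SPEC =====
def Spec_get_risk_score (created_day : Int) (out : String) : Prop := out = get_risk_score_alt created_day
instance (created_day : Int) (out : String) : Decidable (Spec_get_risk_score created_day out) := by unfold Spec_get_risk_score; infer_instance

-- ===== CLAIM (what is proved, stated in full; the proofs are below) =====
def Claim_equal_get_risk_score : Prop := ∀ (created_day : Int), Dom_get_risk_score created_day → Spec_get_risk_score created_day (get_risk_score created_day)

-- ===== LEMMAS AND PROOFS =====

-- ===== VERDICT (by name: the statement is the Claim_ definition above) =====
theorem get_risk_score_spec : Claim_equal_get_risk_score := by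
  intro d _
  show get_risk_score d = get_risk_score_alt d
  unfold get_risk_score get_risk_score_alt pvLoopA pvBisectRight pvThresholds pvLabels
  have hcase : d < 3 ∨ (3 ≤ d ∧ d < 5) ∨ (5 ≤ d ∧ d < 8) ∨ (8 ≤ d ∧ d < 10) ∨ 10 ≤ d := by omega
  rcases hcase with h | ⟨h, h'⟩ | ⟨h, h'⟩ | ⟨h, h'⟩ | h
  · simp [decide_eq_false (by omega : ¬ (3:Int) ≤ d), decide_eq_false (by omega : ¬ (5:Int) ≤ d), decide_eq_false (by omega : ¬ (8:Int) ≤ d),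
      decide_eq_false (by omega : ¬ (10:Int) ≤ d), h, List.filter, Option.getD, List.getD]
  · simp [h, decide_eq_false (by omega : ¬ (5:Int) ≤ d), decide_eq_false (by omega : ¬ (8:Int) ≤ d), decide_eq_false (by omega : ¬ (10:Int) ≤ d),
      if_neg (by omega : ¬ d < 3), h', List.filter, Option.getD, List.getD, pvLoopA]
  · simp [h, decide_eq_true (by omega : (3:Int) ≤ d), decide_eq_false (by omega : ¬ (8:Int) ≤ d), decide_eq_false (by omega : ¬ (10:Int) ≤ d),
      if_neg (by omega : ¬ d < 3), if_neg (by omega : ¬ d < 5), h', List.filter, Option.getD, List.getD, pvLoopA]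
  · simp [h, decide_eq_true (by omega : (3:Int) ≤ d), decide_eq_true (by omega : (5:Int) ≤ d), decide_eq_false (by omega : ¬ (10:Int) ≤ d),
      if_neg (by omega : ¬ d < 3), if_neg (by omega : ¬ d < 5), if_neg (by omega : ¬ d < 8), h', List.filter, Option.getD, List.getD, pvLoopA]
  · simp [h, decide_eq_true (by omega : (3:Int) ≤ d), decide_eq_true (by omega : (5:Int) ≤ d), decide_eq_true (by omega : (8:Int) ≤ d),
      if_neg (by omega : ¬ d < 3), if_neg (by omega : ¬ d < 5), if_neg (by omega : ¬ d < 8),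
      List.filter, Option.getD, List.getD, pvLoopA]
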